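-- pv_equiv track=rewrite | github.com/PiotrMaciejKowalski/cmi-zjazd-9-python | grupa 4/zjazd5zad3.py | bramki
-- ===== SOURCE A (Python) =====
-- def policz_jedynki_binarne(liczba):
--     result = 0
--     while liczba > 0:
--         result += liczba % 2 # 1 lub 0
--         liczba //= 2 # usuniecie ostatniej cyfry binarnej
--     return result
--
-- def bramki(n, m):
--
--     if n > m :
--         return 0, [] # 0 mozliwych przypisan, zatem lista rozwiazan jest pusta
--
--     result = 0 #ilosci rozwiazan
--     sol = [] # lista rozwiazan
--     for i in range(0,2**m):
--         # trzeba policzyc ilosc 1 w reprezentacji binarnej liczby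
--         if policz_jedynki_binarne(i) == n:
--             result += 1
--             sol.append(i)
--     return result, sol
-- ===== SOURCE B (Python) =====
-- def bramki(n, m):
--     if n < 0 or n > m:
--         return 0, []
--     # rows[c] = ascending list of the integers below 2**i with exactly c set bits;
--     # one pass over the bit positions instead of scanning all 2**m numbers
--     rows = [[0]] + [[] for _ in range(n)]
--     for i in range(m):
--         bit = 2 ** i
--         rows = [rows[0]] + [rows[c] + [bit + x for x in rows[c - 1]] for c in range(1, n + 1)]
--     sol = rows[n]
--     return len(sol), sol
-- ===== Notes on version B (the rewrite author's own statement) =====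
-- stated objective: alternative
-- what changed: Instead of scanning all 2**m integers and counting the set bits of each, B keeps per-bit-count solution lists and extends them across the m bit positions (bottom-up DP), returning the length of the n-bit row as the count.
-- outside the precondition, e.g. on bramki(-3, -2): A raises TypeError, B returns (0, [])
import Mathlib
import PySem

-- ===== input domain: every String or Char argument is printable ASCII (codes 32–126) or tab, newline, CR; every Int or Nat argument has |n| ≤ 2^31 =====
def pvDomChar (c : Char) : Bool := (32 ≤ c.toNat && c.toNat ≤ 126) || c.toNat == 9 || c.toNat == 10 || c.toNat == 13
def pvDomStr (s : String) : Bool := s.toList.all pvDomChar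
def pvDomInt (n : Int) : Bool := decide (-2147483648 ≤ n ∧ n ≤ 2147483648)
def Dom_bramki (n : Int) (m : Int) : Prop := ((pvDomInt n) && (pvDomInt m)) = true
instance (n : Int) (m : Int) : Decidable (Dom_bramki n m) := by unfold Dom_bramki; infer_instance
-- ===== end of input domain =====

-- B replaces A's scan of all 2**m numbers (counting each one's bits) by a bottom-up
-- DP over the bit positions that builds only the solution lists (objective: alternative).

-- ===== PORT A =====
def policz_jedynki_binarne_aux (liczba result : Int) : Int :=
  if liczba > 0 then
    policz_jedynki_binarne_aux (PySem.Int.floordiv liczba 2) (result + PySem.Int.mod liczba 2)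
  else result
termination_by liczba.toNat
decreasing_by
  rw [PySem.Int.floordiv_eq_ediv_of_pos (by omega)]
  omega

def policz_jedynki_binarne (liczba : Int) : Int :=
  policz_jedynki_binarne_aux liczba 0

def bramki (n : Int) (m : Int) : Int × List Int :=
  if n > m then (0, [])
  else
    (PySem.List.pyRange 0 (2 ^ m.toNat) 1).foldl
      (fun (st : Int × List Int) i =>
        if policz_jedynki_binarne i == n then (st.1 + 1, st.2 ++ [i]) else st)
      (0, [])

-- ===== PORT B =====
def bramkiAltStep (n : Nat) (i : Nat) (rows : List (List Int)) : List (List Int) :=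
  [rows.getD 0 []] ++ (List.range' 1 n).map
    (fun c => rows.getD c [] ++ (rows.getD (c - 1) []).map (fun x => 2 ^ i + x))

def bramki_alt (n : Int) (m : Int) : Int × List Int :=
  if n < 0 ∨ n > m then (0, [])
  else
    let rows := (List.range m.toNat).foldl (fun rows i => bramkiAltStep n.toNat i rows)
      ([[0]] ++ List.replicate n.toNat [])
    let sol := rows.getD n.toNat []
    ((sol.length : Int), sol)

-- ===== PRECONDITION & SPEC =====
-- Pre_ excludes m < 0 with n ≤ m, where A raises TypeError (2**m is a float, range rejects it).
def Pre_bramki (n : Int) (m : Int) : Prop := 0 ≤ m ∨ m < n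
instance (n : Int) (m : Int) : Decidable (Pre_bramki n m) := by unfold Pre_bramki; infer_instance
def pvWitness_bramki : Int × Int := (2, 4)

def Spec_bramki (n : Int) (m : Int) (out : Int × List Int) : Prop := out = bramki_alt n m
instance (n : Int) (m : Int) (out : Int × List Int) : Decidable (Spec_bramki n m out) := by unfold Spec_bramki; infer_instance

-- ===== CLAIM (what is proved, stated in full; the proofs are below) =====
def Claim_equal_bramki : Prop := ∀ (n : Int) (m : Int), Dom_bramki n m → Pre_bramki n m → Spec_bramki n m (bramki n m)

-- ===== LEMMAS AND PROOFS =====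

/-- Nat-level popcount used only in the proofs. -/
def popNat (k : Nat) : Nat :=
  if k = 0 then 0 else k % 2 + popNat (k / 2)
termination_by k
decreasing_by exact Nat.div_lt_self (by omega) (by omega)

theorem popNat_eq (k : Nat) : popNat k = k % 2 + popNat (k / 2) := by
  by_cases h : k = 0
  · subst h; simp [popNat]
  · rw [popNat]; simp [h]

theorem policz_aux_natCast (k : Nat) (r : Int) :
    policz_jedynki_binarne_aux ((k : Nat) : Int) r = r + ((popNat k : Nat) : Int) := by
  induction k using Nat.strong_induction_on generalizing r with
  | _ k ih =>
    by_cases h : k = 0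
    · subst h; rw [policz_jedynki_binarne_aux, popNat]; simp
    · rw [policz_jedynki_binarne_aux]
      have hk : ((k : Nat) : Int) > 0 := by omega
      simp only [hk, if_pos]
      have h2 : PySem.Int.floordiv ((k : Nat) : Int) 2 = ((k / 2 : Nat) : Int) := by
        exact_mod_cast PySem.Int.floordiv_natCast k 2
      have h3 : PySem.Int.mod ((k : Nat) : Int) 2 = ((k % 2 : Nat) : Int) := by
        exact_mod_cast PySem.Int.mod_natCast k 2
      rw [h2, h3, ih (k / 2) (Nat.div_lt_self (by omega) (by omega))]
      rw [popNat_eq k]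
      push_cast
      ring

theorem policz_natCast (k : Nat) :
    policz_jedynki_binarne ((k : Nat) : Int) = ((popNat k : Nat) : Int) := by
  rw [policz_jedynki_binarne, policz_aux_natCast]; simp

theorem popNat_add_pow (M : Nat) : ∀ k, k < 2 ^ M → popNat (2 ^ M + k) = popNat k + 1 := by
  induction M with
  | zero =>
    intro k hk
    interval_cases k
    have h0 : popNat 0 = 0 := by rw [popNat]; simp
    have h1 : popNat (2 ^ 0 + 0) = 1 := by rw [popNat_eq]; norm_num [h0]
    rw [h1, h0]
  | succ M ih =>
    intro k hk
    rw [popNat_eq (2 ^ (M + 1) + k)]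
    have e1 : (2 ^ (M + 1) + k) % 2 = k % 2 := by
      have : 2 ^ (M + 1) = 2 * 2 ^ M := by ring
      omega
    have e2 : (2 ^ (M + 1) + k) / 2 = 2 ^ M + k / 2 := by
      have : 2 ^ (M + 1) = 2 * 2 ^ M := by ring
      omega
    rw [e1, e2, ih (k / 2) (by omega), popNat_eq k]
    omega

/-- The filtered range, at the Nat level. -/
def popFilt (n M : Nat) : List Int :=
  ((List.range (2 ^ M)).filter (fun k => popNat k == n)).map Int.ofNat

theorem popFilt_zero (c : Nat) : popFilt c 0 = if c = 0 then [0] else [] := by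
  unfold popFilt
  have h0 : popNat 0 = 0 := by rw [popNat]; simp
  rw [pow_zero, List.range_one]
  by_cases h : c = 0
  · subst h; simp [h0]
  · rw [if_neg h]
    simp [h0, h]
    omega

theorem popFilt_split (n M : Nat) :
    popFilt n (M + 1)
      = popFilt n M ++ ((List.range (2 ^ M)).filter (fun k => popNat k + 1 == n)).map
          (fun k => (2 : Int) ^ M + Int.ofNat k) := by
  have hsplit : List.range (2 ^ (M + 1)) =
      List.range (2 ^ M) ++ (List.range (2 ^ M)).map (fun k => 2 ^ M + k) := by
    have : 2 ^ (M + 1) = 2 ^ M + 2 ^ M := by ring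
    rw [this, List.range_add]
  have hfc : ∀ k ∈ List.range (2 ^ M),
      ((fun k => popNat k == n) ∘ (fun k => 2 ^ M + k)) k = (popNat k + 1 == n) := by
    intro k hk
    simp only [Function.comp_apply]
    rw [popNat_add_pow M k (List.mem_range.mp hk)]
  unfold popFilt
  rw [hsplit, List.filter_append, List.map_append]
  congr 1
  rw [List.filter_map, List.filter_congr hfc, List.map_map]
  apply List.map_congr_left
  intro k _
  simp only [Function.comp_apply, Int.ofNat_eq_natCast]
  push_cast
  ring

theorem popFilt_zero_succ (M : Nat) : popFilt 0 (M + 1) = popFilt 0 M := by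
  rw [popFilt_split]
  have h : ∀ k ∈ List.range (2 ^ M), (popNat k + 1 == 0) = false := by
    intro k _; simp
  rw [List.filter_congr h]
  simp

theorem popFilt_succ_succ (c M : Nat) :
    popFilt (c + 1) (M + 1)
      = popFilt (c + 1) M ++ (popFilt c M).map (fun x => (2 : Int) ^ M + x) := by
  rw [popFilt_split]
  congr 1
  have h : ∀ k ∈ List.range (2 ^ M), (popNat k + 1 == c + 1) = (popNat k == c) := by
    intro k _; simp
  rw [List.filter_congr h]
  unfold popFilt
  rw [List.map_map]
  rfl

theorem step_inv (n i : Nat) :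
    bramkiAltStep n i ((List.range (n + 1)).map (fun c => popFilt c i))
      = (List.range (n + 1)).map (fun c => popFilt c (i + 1)) := by
  unfold bramkiAltStep
  rw [PySem.List.getD_map_range _ _ _ _ (by omega)]
  have hmapL : (List.range' 1 n).map (fun c =>
      ((List.range (n + 1)).map (fun c => popFilt c i)).getD c []
        ++ (((List.range (n + 1)).map (fun c => popFilt c i)).getD (c - 1) []).map
            (fun x => 2 ^ i + x))
      = (List.range' 1 n).map (fun c => popFilt c (i + 1)) := by
    apply List.map_congr_left
    intro c hc
    have hc' : 1 ≤ c ∧ c < 1 + n := by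
      rw [List.mem_range'] at hc
      omega
    rw [PySem.List.getD_map_range _ _ _ _ (by omega),
        PySem.List.getD_map_range _ _ _ _ (by omega)]
    obtain ⟨c', rfl⟩ : ∃ c', c = c' + 1 := ⟨c - 1, by omega⟩
    simp only [Nat.add_sub_cancel]
    exact (popFilt_succ_succ c' i).symm
  rw [hmapL]
  have hr : List.range (n + 1) = 0 :: List.range' 1 n := by
    rw [List.range_eq_range']
    rfl
  rw [hr, List.map_cons, popFilt_zero_succ]
  rfl

theorem fold_rows (n M : Nat) :
    (List.range M).foldl (fun rows i => bramkiAltStep n i rows)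
        ([[0]] ++ List.replicate n [])
      = (List.range (n + 1)).map (fun c => popFilt c M) := by
  induction M with
  | zero =>
    simp only [List.range_zero, List.foldl_nil]
    induction n with
    | zero => simp [popFilt_zero]
    | succ n ihn =>
      rw [List.replicate_succ', List.range_succ, List.map_append, ← List.append_assoc, ihn]
      congr 1
      simp [popFilt_zero]
  | succ M ihM =>
    rw [List.range_succ, List.foldl_append, ihM]
    simp only [List.foldl_cons, List.foldl_nil]
    exact step_inv n M

theorem fold_filter (n : Int) (l : List Int) : ∀ (r : Int) (s : List Int),
    l.foldl (fun (st : Int × List Int) i =>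
        if policz_jedynki_binarne i == n then (st.1 + 1, st.2 ++ [i]) else st) (r, s)
      = (r + ((l.filter (fun i => policz_jedynki_binarne i == n)).length : Int),
         s ++ l.filter (fun i => policz_jedynki_binarne i == n)) := by
  induction l with
  | nil => intro r s; simp
  | cons a l ih =>
    intro r s
    by_cases h : (policz_jedynki_binarne a == n) = true
    · rw [List.foldl_cons, if_pos h, ih]
      simp only [List.filter_cons, h, if_true, List.length_cons, Prod.mk.injEq]
      exact ⟨by push_cast; ring, by simp⟩
    · have h' : (policz_jedynki_binarne a == n) = false := by simp_all
      rw [List.foldl_cons, if_neg h, ih]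
      simp only [List.filter_cons, h', Bool.false_eq_true, if_false]

theorem pyRange_pow (N : Nat) :
    PySem.List.pyRange 0 ((2 ^ N : Nat) : Int) 1 = (List.range (2 ^ N)).map Int.ofNat := by
  rw [PySem.List.pyRange_one]
  have h1 : (((2 ^ N : Nat) : Int) - 0).toNat = 2 ^ N := by
    rw [sub_zero, Int.toNat_natCast]
  rw [h1]
  exact List.map_congr_left (fun k _ => by rw [zero_add]; rfl)

-- ===== VERDICT (by name: the statement is the Claim_ definition above) =====
theorem bramki_spec : Claim_equal_bramki := by
  intro n m _ hpre
  unfold Spec_bramki bramki bramki_alt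
  by_cases hgt : n > m
  · rw [if_pos hgt, if_pos (Or.inr hgt)]
  · have hm : 0 ≤ m := by
      rcases hpre with h | h
      · exact h
      · omega
    rw [if_neg hgt]
    set N := m.toNat with hN
    have hrange : PySem.List.pyRange 0 ((2 : Int) ^ N) 1
        = (List.range (2 ^ N)).map Int.ofNat := by
      have : ((2 : Int) ^ N) = ((2 ^ N : Nat) : Int) := by push_cast; ring
      rw [this, pyRange_pow]
    rw [hrange]
    by_cases hneg : n < 0
    · rw [if_pos (Or.inl hneg)]
      have hnil : ((List.range (2 ^ N)).map Int.ofNat).filter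
          (fun i => policz_jedynki_binarne i == n) = [] := by
        apply List.filter_eq_nil_iff.mpr
        intro i hi
        obtain ⟨k, _, rfl⟩ := List.mem_map.mp hi
        simp only [Int.ofNat_eq_natCast, policz_natCast, beq_iff_eq]
        omega
      rw [fold_filter, hnil]
      simp
    · rw [if_neg (by push_neg; exact ⟨by omega, by omega⟩)]
      obtain ⟨n', rfl⟩ : ∃ n' : Nat, n = (n' : Int) := ⟨n.toNat, by omega⟩
      rw [fold_filter]
      have hfe : ((List.range (2 ^ N)).map Int.ofNat).filter
          (fun i => policz_jedynki_binarne i == (n' : Int))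
          = popFilt n' N := by
        unfold popFilt
        rw [List.filter_map]
        congr 1
        apply List.filter_congr
        intro k _
        simp only [Function.comp_apply, Int.ofNat_eq_natCast, policz_natCast]
        simp
      have htn : ((n' : Int)).toNat = n' := Int.toNat_natCast n'
      rw [hfe]
      simp only [htn, fold_rows]
      rw [PySem.List.getD_map_range _ _ _ _ (by omega)]
      simp
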